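-- pv_equiv track=rewrite | github.com/soheshdoshi/Ds-Algo | Hashing/colorfull.py | arraySeq
-- ===== SOURCE A (Python) =====
-- def multi(list):
--     ans=1
--     for i in list:
--         ans*=i
--     return ans
--
-- def arraySeq(arr_list):
--     lenth=len(arr_list)
--     s=set()
--     for i in range(lenth):
--         for j in range(i,lenth):
--             k=multi(arr_list[i:j+1])
--             if k in s:
--                 return 0
--             else:
--                 s.add(k)
--     return 1
-- ===== SOURCE B (Python) =====
-- def arraySeq(arr_list):
--     seen = set()
--     for i in range(len(arr_list)):
--         p = 1
--         for x in arr_list[i:]: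
--             p *= x
--             if p in seen:
--                 return 0
--             seen.add(p)
--     return 1
-- ===== Notes on version B (the rewrite author's own statement) =====
-- stated objective: faster
-- what changed: B maintains one running product per start index and a single seen-set threaded across start indices, instead of A's recomputation of every subarray product from scratch via a slice-and-multiply helper inside the nested scan.
import Mathlib
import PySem

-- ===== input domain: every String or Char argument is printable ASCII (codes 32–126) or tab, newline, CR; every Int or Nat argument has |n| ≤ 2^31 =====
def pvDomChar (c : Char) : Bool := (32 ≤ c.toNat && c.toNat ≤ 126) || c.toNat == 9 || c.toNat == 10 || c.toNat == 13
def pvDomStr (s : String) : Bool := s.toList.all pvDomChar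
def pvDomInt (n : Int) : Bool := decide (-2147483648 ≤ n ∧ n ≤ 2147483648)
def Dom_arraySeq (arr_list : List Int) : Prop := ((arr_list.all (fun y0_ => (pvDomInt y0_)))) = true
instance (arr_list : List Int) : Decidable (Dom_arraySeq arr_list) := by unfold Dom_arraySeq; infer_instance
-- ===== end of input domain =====

-- B keeps a running product per start index instead of A's per-subarray recomputation by a
-- slice-and-multiply helper (objective: faster, O(n^2) instead of O(n^3) multiplications).

-- ===== PORT A =====
def multi (list : List Int) : Int := list.foldl (fun ans i => ans * i) 1

def arraySeqLoopJ (arr_list : List Int) (i : Int) (js : List Int) (s : PySem.Set Int) :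
    Option (PySem.Set Int) :=
  match js with
  | [] => some s
  | j :: rest =>
    let k := multi (PySem.List.slice arr_list (some i) (some (j + 1)))
    if PySem.Set.contains s k then none
    else arraySeqLoopJ arr_list i rest (PySem.Set.add s k)

def arraySeqLoopI (arr_list : List Int) (lenth : Int) (is_ : List Int) (s : PySem.Set Int) :
    Option (PySem.Set Int) :=
  match is_ with
  | [] => some s
  | i :: rest =>
    match arraySeqLoopJ arr_list i (PySem.List.pyRange i lenth 1) s with
    | none => none
    | some s' => arraySeqLoopI arr_list lenth rest s'

def arraySeq (arr_list : List Int) : Int :=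
  let lenth := PySem.List.len arr_list
  match arraySeqLoopI arr_list lenth (PySem.List.pyRange 0 lenth 1) PySem.Set.empty with
  | none => 0
  | some _ => 1

-- ===== PORT B =====
-- inner loop of Source B: p *= x; duplicate check against seen; early return 0 = none
def arraySeqAltInner (seen : PySem.Set Int) (p : Int) (t : List Int) : Option (PySem.Set Int) :=
  match t with
  | [] => some seen
  | x :: rest =>
    let p' := p * x
    if PySem.Set.contains seen p' then none
    else arraySeqAltInner (PySem.Set.add seen p') p' rest

def arraySeqAltOuter (arr_list : List Int) (is_ : List Int) (seen : PySem.Set Int) :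
    Option (PySem.Set Int) :=
  match is_ with
  | [] => some seen
  | i :: rest =>
    match arraySeqAltInner seen 1 (PySem.List.slice arr_list (some i) none) with
    | none => none
    | some seen' => arraySeqAltOuter arr_list rest seen'

def arraySeq_alt (arr_list : List Int) : Int :=
  match arraySeqAltOuter arr_list
      (PySem.List.pyRange 0 (PySem.List.len arr_list) 1) PySem.Set.empty with
  | none => 0
  | some _ => 1

-- ===== PRECONDITION & SPEC =====
def Spec_arraySeq (arr_list : List Int) (out : Int) : Prop := out = arraySeq_alt arr_list
instance (arr_list : List Int) (out : Int) : Decidable (Spec_arraySeq arr_list out) := by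
  unfold Spec_arraySeq; infer_instance

-- ===== CLAIM (what is proved, stated in full; the proofs are below) =====
def Claim_equal_arraySeq : Prop := ∀ (arr_list : List Int), Dom_arraySeq arr_list → Spec_arraySeq arr_list (arraySeq arr_list)

-- ===== LEMMAS AND PROOFS =====

-- products of the nonempty prefixes of t, starting from running product p
def prodsFrom (p : Int) : List Int → List Int
  | [] => []
  | x :: xs => (p * x) :: prodsFrom (p * x) xs

-- insert each key into the set, aborting with none on the first duplicate
def addDistinct (s : PySem.Set Int) : List Int → Option (PySem.Set Int)
  | [] => some s
  | k :: rest => if PySem.Set.contains s k then none else addDistinct (PySem.Set.add s k) rest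

-- all contiguous-subarray products, grouped by start index
def allProds (arr : List Int) : List Int :=
  ((List.range arr.length).map (fun a => prodsFrom 1 (arr.drop a))).flatten

theorem multi_eq_prod (l : List Int) : multi l = l.prod := by
  rw [List.prod_eq_foldl]; rfl

theorem prodsFrom_eq_map (t : List Int) (p : Int) :
    prodsFrom p t = (List.range t.length).map (fun m => p * (t.take (m + 1)).prod) := by
  induction t generalizing p with
  | nil => rfl
  | cons x xs ih =>
    simp only [prodsFrom, ih, List.length_cons, List.range_succ_eq_map, List.map_cons,
      List.map_map]
    congr 1
    · simp
    · apply List.map_congr_left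
      intro m _
      simp [List.take_succ_cons, mul_assoc]

theorem loopJ_eq (arr : List Int) (i : Int) (js : List Int) (s : PySem.Set Int) :
    arraySeqLoopJ arr i js s =
      addDistinct s (js.map (fun j => multi (PySem.List.slice arr (some i) (some (j + 1))))) := by
  induction js generalizing s with
  | nil => rfl
  | cons j rest ih =>
    simp only [arraySeqLoopJ, List.map_cons, addDistinct]
    split <;> simp [ih]

theorem addDistinct_append (s : PySem.Set Int) (ks1 ks2 : List Int) :
    addDistinct s (ks1 ++ ks2) =
      match addDistinct s ks1 with
      | none => none
      | some t => addDistinct t ks2 := by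
  induction ks1 generalizing s with
  | nil => rfl
  | cons k rest ih =>
    simp only [List.cons_append, addDistinct]
    split <;> simp [ih]

theorem loopI_eq (arr : List Int) (n : Int) (is_ : List Int) (s : PySem.Set Int) :
    arraySeqLoopI arr n is_ s =
      addDistinct s
        ((is_.map (fun i =>
            (PySem.List.pyRange i n 1).map
              (fun j => multi (PySem.List.slice arr (some i) (some (j + 1)))))).flatten) := by
  induction is_ generalizing s with
  | nil => rfl
  | cons i rest ih =>
    simp only [arraySeqLoopI, List.map_cons, List.flatten_cons, addDistinct_append, loopJ_eq]
    split <;> simp_all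

theorem ksA_eq (arr : List Int) (a : Nat) (ha : a ≤ arr.length) :
    (PySem.List.pyRange (a : Int) (arr.length : Int) 1).map
        (fun j => multi (PySem.List.slice arr (some (a : Int)) (some (j + 1)))) =
      prodsFrom 1 (arr.drop a) := by
  rw [PySem.List.pyRange_one, List.map_map, prodsFrom_eq_map]
  have hlen : ((arr.length : Int) - (a : Int)).toNat = (arr.drop a).length := by
    simp only [List.length_drop]
    omega
  rw [hlen]
  apply List.map_congr_left
  intro m _
  have hcast : (a : Int) + (m : Int) + 1 = (a : Int) + ((m + 1 : Nat) : Int) := by push_cast; ring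
  simp only [Function.comp_apply, hcast, PySem.List.slice_natCast_add, multi_eq_prod, one_mul]

-- A's result characterised: abort-on-duplicate insertion of all subarray products
theorem arraySeq_char (arr : List Int) :
    arraySeq arr =
      match addDistinct PySem.Set.empty (allProds arr) with
      | none => 0
      | some _ => 1 := by
  rw [show arraySeq arr =
      (match arraySeqLoopI arr (PySem.List.len arr)
          (PySem.List.pyRange 0 (PySem.List.len arr) 1) PySem.Set.empty with
        | none => (0 : Int)
        | some _ => 1) from rfl]
  rw [PySem.List.len_eq, loopI_eq]
  have hflat :
      ((PySem.List.pyRange 0 (arr.length : Int) 1).map (fun i =>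
          (PySem.List.pyRange i (arr.length : Int) 1).map
            (fun j => multi (PySem.List.slice arr (some i) (some (j + 1)))))).flatten
        = allProds arr := by
    rw [PySem.List.pyRange_one, List.map_map]
    unfold allProds
    congr 1
    have h0 : ((arr.length : Int) - 0).toNat = arr.length := by omega
    rw [h0]
    apply List.map_congr_left
    intro a hma
    rw [List.mem_range] at hma
    have h1 : (0 : Int) + (a : Int) = (a : Int) := by ring
    simp only [Function.comp_apply, h1]
    exact ksA_eq arr a (Nat.le_of_lt hma)
  rw [hflat]

theorem altInner_eq (t : List Int) (seen : PySem.Set Int) (p : Int) :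
    arraySeqAltInner seen p t = addDistinct seen (prodsFrom p t) := by
  induction t generalizing seen p with
  | nil => rfl
  | cons x rest ih =>
    simp only [arraySeqAltInner, prodsFrom, addDistinct]
    split <;> simp [ih]

theorem altOuter_eq (arr : List Int) (is_ : List Int) (seen : PySem.Set Int) :
    arraySeqAltOuter arr is_ seen =
      addDistinct seen
        ((is_.map (fun i => prodsFrom 1 (PySem.List.slice arr (some i) none))).flatten) := by
  induction is_ generalizing seen with
  | nil => rfl
  | cons i rest ih =>
    simp only [arraySeqAltOuter, List.map_cons, List.flatten_cons, addDistinct_append,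
      altInner_eq]
    split <;> simp_all

-- B's result characterised: the same insertion over the same product list
theorem arraySeq_alt_char (arr : List Int) :
    arraySeq_alt arr =
      match addDistinct PySem.Set.empty (allProds arr) with
      | none => 0
      | some _ => 1 := by
  unfold arraySeq_alt
  rw [PySem.List.len_eq, altOuter_eq]
  have hprods :
      ((PySem.List.pyRange 0 (arr.length : Int) 1).map
          (fun i => prodsFrom 1 (PySem.List.slice arr (some i) none))).flatten = allProds arr := by
    rw [PySem.List.pyRange_one, List.map_map]
    unfold allProds
    congr 1
    have h0 : ((arr.length : Int) - 0).toNat = arr.length := by omega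
    rw [h0]
    apply List.map_congr_left
    intro a _
    have h1 : (0 : Int) + (a : Int) = (a : Int) := by ring
    simp only [Function.comp_apply, h1, PySem.List.slice_from_natCast]
  rw [hprods]

-- ===== VERDICT (by name: the statement is the Claim_ definition above) =====
theorem arraySeq_spec : Claim_equal_arraySeq := by
  intro arr _
  unfold Spec_arraySeq
  rw [arraySeq_char, arraySeq_alt_char]
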